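-- pv_equiv track=rewrite | github.com/whois-api-llc/web-categorization-v2 | wxawebcat_fetcher_enhanced.py | extract_tld
-- ===== SOURCE A (Python) =====
-- from typing import Any, Dict, Optional, Tuple, List
--
-- TLD_CATEGORY_MAP = {
--     # Government
--     ".gov": ("Government", 0.99, "Government TLD"),
--     ".gov.uk": ("Government", 0.99, "Government TLD"),
--     ".gov.au": ("Government", 0.99, "Government TLD"),
--     ".gov.ca": ("Government", 0.99, "Government TLD"),
--     ".mil": ("Government", 0.99, "Military TLD"),
--
--     # Education
--     ".edu": ("Education", 0.98, "Educational institution TLD"),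
--     ".ac.uk": ("Education", 0.98, "Academic TLD"),
--     ".edu.au": ("Education", 0.98, "Educational TLD"),
--     ".edu.cn": ("Education", 0.98, "Educational TLD"),
--
--     # Adult Content
--     ".xxx": ("Adult", 0.99, "Adult content TLD"),
--     ".adult": ("Adult", 0.98, "Adult content TLD"),
--     ".porn": ("Adult", 0.99, "Adult content TLD"),
--     ".sex": ("Adult", 0.98, "Adult content TLD"),
--
--     # Cryptocurrency/Blockchain
--     ".crypto": ("Technology", 0.85, "Cryptocurrency TLD"),
--     ".nft": ("Technology", 0.85, "NFT/Blockchain TLD"),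
--     ".blockchain": ("Technology", 0.90, "Blockchain TLD"),
--
--     # Geographic indicators (lower confidence)
--     ".museum": ("Arts_Entertainment", 0.85, "Museum TLD"),
--     ".church": ("Religion", 0.85, "Religious organization TLD"),
--     ".bank": ("Finance", 0.90, "Banking TLD"),
--     ".insurance": ("Finance", 0.85, "Insurance TLD"),
--
--     # Development/Testing
--     ".localhost": ("Development", 0.99, "Localhost TLD"),
--     ".local": ("Development", 0.95, "Local development TLD"),
--     ".test": ("Development", 0.99, "Test TLD"),
--     ".example": ("Development", 0.99, "Example TLD"),
-- }
--
-- def extract_tld(fqdn: str) -> Optional[str]: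
--     """
--     Extract TLD from FQDN, handling multi-part TLDs.
--     Returns the TLD including the dot (e.g., '.gov', '.ac.uk')
--     """
--     if not fqdn:
--         return None
--
--     fqdn_lower = fqdn.lower().rstrip('.')
--
--     # Check multi-part TLDs first (longest match)
--     for tld in sorted(TLD_CATEGORY_MAP.keys(), key=len, reverse=True):
--         if fqdn_lower.endswith(tld):
--             return tld
--
--     # Check single-part TLD
--     if '.' in fqdn_lower:
--         parts = fqdn_lower.split('.')
--         tld = '.' + parts[-1]
--         if tld in TLD_CATEGORY_MAP:
--             return tld
--
--     return None
-- ===== SOURCE B (Python) =====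
-- from typing import Optional
--
-- TLD_CATEGORY_MAP = {
--     ".gov": ("Government", 0.99, "Government TLD"),
--     ".gov.uk": ("Government", 0.99, "Government TLD"),
--     ".gov.au": ("Government", 0.99, "Government TLD"),
--     ".gov.ca": ("Government", 0.99, "Government TLD"),
--     ".mil": ("Government", 0.99, "Military TLD"),
--     ".edu": ("Education", 0.98, "Educational institution TLD"),
--     ".ac.uk": ("Education", 0.98, "Academic TLD"),
--     ".edu.au": ("Education", 0.98, "Educational TLD"),
--     ".edu.cn": ("Education", 0.98, "Educational TLD"),
--     ".xxx": ("Adult", 0.99, "Adult content TLD"),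
--     ".adult": ("Adult", 0.98, "Adult content TLD"),
--     ".porn": ("Adult", 0.99, "Adult content TLD"),
--     ".sex": ("Adult", 0.98, "Adult content TLD"),
--     ".crypto": ("Technology", 0.85, "Cryptocurrency TLD"),
--     ".nft": ("Technology", 0.85, "NFT/Blockchain TLD"),
--     ".blockchain": ("Technology", 0.90, "Blockchain TLD"),
--     ".museum": ("Arts_Entertainment", 0.85, "Museum TLD"),
--     ".church": ("Religion", 0.85, "Religious organization TLD"),
--     ".bank": ("Finance", 0.90, "Banking TLD"),
--     ".insurance": ("Finance", 0.85, "Insurance TLD"),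
--     ".localhost": ("Development", 0.99, "Localhost TLD"),
--     ".local": ("Development", 0.95, "Local development TLD"),
--     ".test": ("Development", 0.99, "Test TLD"),
--     ".example": ("Development", 0.99, "Example TLD"),
-- }
--
-- def extract_tld(fqdn):
--     """Extract TLD from FQDN: scan the dot positions of the normalised name
--     left to right (longest suffix first) and return the first suffix that is
--     a key of TLD_CATEGORY_MAP; every key starts with '.', so any matching key
--     is such a suffix."""
--     if not fqdn:
--         return None
--     s = fqdn.lower().rstrip('.')
--     for i in range(len(s)):
--         if s[i] == '.' and s[i:] in TLD_CATEGORY_MAP: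
--             return s[i:]
--     return None
-- ===== Notes on version B (the rewrite author's own statement) =====
-- stated objective: idiomatic
-- what changed: Instead of scanning every map key sorted by length for an endswith match (plus a second split-based single-part pass), B enumerates the dot positions of the normalised name left to right (longest suffix first) and returns the first suffix that is a key of the map, one dict lookup per dot; this is correct because every key begins with a dot, so a matching key is always a dot-suffix.
import Mathlib
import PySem

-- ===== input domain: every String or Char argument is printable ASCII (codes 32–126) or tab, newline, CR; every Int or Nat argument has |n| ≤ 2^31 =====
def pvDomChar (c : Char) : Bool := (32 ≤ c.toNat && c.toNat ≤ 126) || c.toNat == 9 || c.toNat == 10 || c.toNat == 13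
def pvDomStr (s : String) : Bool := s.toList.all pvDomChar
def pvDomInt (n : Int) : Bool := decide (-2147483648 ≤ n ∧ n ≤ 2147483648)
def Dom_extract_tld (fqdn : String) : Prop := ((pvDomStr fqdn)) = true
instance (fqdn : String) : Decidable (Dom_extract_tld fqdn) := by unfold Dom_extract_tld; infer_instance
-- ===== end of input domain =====

-- B replaces A's scan of all map keys sorted by length (plus a second split-based pass) by one
-- left-to-right walk over the dot positions of the normalised name, looking each dot-suffix up directly.

-- the keys of TLD_CATEGORY_MAP in insertion order; the mapped values (category, confidence, note)
-- are never read by extract_tld, so only the keys are ported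
def TLD_KEYS : List String :=
  [".gov", ".gov.uk", ".gov.au", ".gov.ca", ".mil",
   ".edu", ".ac.uk", ".edu.au", ".edu.cn",
   ".xxx", ".adult", ".porn", ".sex",
   ".crypto", ".nft", ".blockchain",
   ".museum", ".church", ".bank", ".insurance",
   ".localhost", ".local", ".test", ".example"]

-- hand port of str.rstrip('.') (PySem has no one-sided strip with a char set):
-- drop '.' characters from the right end only; exact for the single-char set '.'
def rstripDot (cs : List Char) : List Char := (cs.reverse.dropWhile (fun c => c == '.')).reverse

-- ===== PORT A =====
-- body of A after the normalisation 'fqdn_lower = fqdn.lower().rstrip('.')' (s = fqdn_lower)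
def extract_tld_core (s : List Char) : Option String :=
  match (PySem.List.sorted TLD_KEYS (fun k => PySem.Str.len k) true).find?
          (fun k => PySem.Chars.endswith s k.toList) with
  | some tld => some tld
  | none =>
    if PySem.Chars.isIn ['.'] s then
      -- tld = '.' + parts[-1]; split('.') never returns an empty list, so the default is unreachable
      if String.ofList ('.' :: ((PySem.List.pyGet? (PySem.Chars.splitOn s ['.']) (-1)).getD [])) ∈ TLD_KEYS
      then some (String.ofList ('.' :: ((PySem.List.pyGet? (PySem.Chars.splitOn s ['.']) (-1)).getD [])))
      else none
    else none

def extract_tld (fqdn : String) : Option String :=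
  if fqdn.toList = [] then none
  else extract_tld_core (rstripDot (PySem.Chars.lower fqdn.toList))

-- ===== PORT B =====
-- B's loop over i in range(len(s)): at each position the candidate s[i:] is the current suffix,
-- so the loop is structural recursion over the suffixes of s
def tld_go : List Char → Option String
  | [] => none
  | c :: t =>
    if c == '.' && TLD_KEYS.contains (String.ofList (c :: t)) then some (String.ofList (c :: t))
    else tld_go t

def extract_tld_alt (fqdn : String) : Option String :=
  if fqdn.toList = [] then none
  else tld_go (rstripDot (PySem.Chars.lower fqdn.toList))

-- ===== PRECONDITION & SPEC =====
def Spec_extract_tld (fqdn : String) (out : Option String) : Prop := out = extract_tld_alt fqdn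
instance (fqdn : String) (out : Option String) : Decidable (Spec_extract_tld fqdn out) := by unfold Spec_extract_tld; infer_instance

-- ===== CLAIM (what is proved, stated in full; the proofs are below) =====
def Claim_equal_extract_tld : Prop := ∀ (fqdn : String), Dom_extract_tld fqdn → Spec_extract_tld fqdn (extract_tld fqdn)

-- ===== LEMMAS AND PROOFS =====

-- TLD_KEYS sorted by length, descending, stable — the literal list A's loop iterates over
def SORTED_KEYS : List String :=
  [".blockchain", ".insurance", ".localhost", ".example",
   ".gov.uk", ".gov.au", ".gov.ca", ".edu.au", ".edu.cn",
   ".crypto", ".museum", ".church",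
   ".ac.uk", ".adult", ".local",
   ".porn", ".bank", ".test",
   ".gov", ".mil", ".edu", ".xxx", ".sex", ".nft"]

theorem sortedKeys_eq :
    PySem.List.sorted TLD_KEYS (fun k => PySem.Str.len k) true = SORTED_KEYS := by decide

theorem sortedKeys_head : ∀ k ∈ SORTED_KEYS, k.toList.head? = some '.' := by decide

theorem sortedKeys_pairwise :
    SORTED_KEYS.Pairwise (fun a b => b.toList.length ≤ a.toList.length) := by decide

theorem sortedKeys_nodup : (SORTED_KEYS.map String.toList).Nodup := by decide

theorem sortedKeys_sub : ∀ k ∈ SORTED_KEYS, k ∈ TLD_KEYS := by decide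

theorem keys_sub_sorted : ∀ k ∈ TLD_KEYS, k ∈ SORTED_KEYS := by decide

theorem singleton_infix {a : Char} {l : List Char} : [a] <:+: l ↔ a ∈ l := by
  constructor
  · intro h
    exact h.subset (by simp)
  · intro h
    obtain ⟨s, t, rfl⟩ := List.append_of_mem h
    exact ⟨s, t, by simp⟩

theorem pyGet?_neg_one {α : Type} (xs : List α) : PySem.List.pyGet? xs (-1) = xs.getLast? := by
  cases xs with
  | nil => rfl
  | cons a l =>
    simp only [PySem.List.pyGet?, PySem.List.pyIdx?, List.getLast?_eq_getElem?]
    norm_num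

-- a direct recursive description of s.split('.')
def consHead : List Char → List (List Char) → List (List Char)
  | p, [] => [p]
  | p, x :: xs => (p ++ x) :: xs

def mySplit : List Char → List (List Char)
  | [] => [[]]
  | c :: t => if c = '.' then [] :: mySplit t else consHead [c] (mySplit t)

theorem mySplit_ne_nil (cs : List Char) : mySplit cs ≠ [] := by
  cases cs with
  | nil => simp [mySplit]
  | cons c t =>
    simp only [mySplit]
    split
    · simp
    · cases h : mySplit t <;> simp [consHead]

theorem mySplit_cons (cs : List Char) : ∃ y ys, mySplit cs = y :: ys := by
  cases h : mySplit cs with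
  | nil => exact absurd h (mySplit_ne_nil cs)
  | cons y ys => exact ⟨y, ys, rfl⟩

theorem splitOn_go_eq (l : List Char) : ∀ (fuel : Nat) (cur : List Char) (acc : List (List Char)),
    l.length ≤ fuel →
    PySem.Chars.splitOn.go ['.'] fuel l cur acc = acc.reverse ++ consHead cur.reverse (mySplit l) := by
  induction l with
  | nil =>
    intro fuel cur acc _
    cases fuel <;> simp [PySem.Chars.splitOn.go, mySplit, consHead]
  | cons c rest ih =>
    intro fuel cur acc hfuel
    simp only [List.length_cons] at hfuel
    cases fuel with
    | zero => omega
    | succ f =>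
      rw [PySem.Chars.splitOn.go]
      obtain ⟨y, ys, hy⟩ := mySplit_cons rest
      by_cases hc : c = '.'
      · subst hc
        have hpre : ¬ (['.'].isPrefixOf ('.' :: rest) = true) → False := by
          intro h; exact h (by simp [List.isPrefixOf])
        rw [if_pos (by simp [List.isPrefixOf])]
        have hdrop : List.drop ['.'].length ('.' :: rest) = rest := by simp
        rw [hdrop, ih f [] (cur.reverse :: acc) (by omega)]
        simp [mySplit, hy, consHead]
      · have hpre : ¬ (['.'].isPrefixOf (c :: rest) = true) := by
          simp [List.isPrefixOf]
          exact fun h => hc h.symm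
        rw [if_neg hpre, ih f (c :: cur) acc (by omega)]
        simp [mySplit, hc, hy, consHead, List.append_assoc]

theorem splitOn_dot (cs : List Char) : PySem.Chars.splitOn cs ['.'] = mySplit cs := by
  have h := splitOn_go_eq cs (cs.length + 1) [] [] (by omega)
  obtain ⟨y, ys, hy⟩ := mySplit_cons cs
  rw [PySem.Chars.splitOn] at *
  rw [h, hy]
  simp [consHead]

theorem mySplit_no_dot (cs : List Char) (h : '.' ∉ cs) : mySplit cs = [cs] := by
  induction cs with
  | nil => rfl
  | cons c t ih =>
    have hc : c ≠ '.' := fun hc => h (hc ▸ List.mem_cons_self)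
    have ht : '.' ∉ t := fun ht => h (List.mem_cons_of_mem _ ht)
    simp [mySplit, hc, ih ht, consHead]

theorem mySplit_dot (cs : List Char) (h : '.' ∈ cs) :
    ∃ y z zs, mySplit cs = y :: z :: zs := by
  induction cs with
  | nil => simp at h
  | cons c t ih =>
    by_cases hc : c = '.'
    · subst hc
      obtain ⟨y, ys, hy⟩ := mySplit_cons t
      exact ⟨[], y, ys, by simp [mySplit, hy]⟩
    · have ht : '.' ∈ t := by
        rcases List.mem_cons.mp h with h1 | h1
        · exact absurd h1.symm hc
        · exact h1
      obtain ⟨y, z, zs, hy⟩ := ih ht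
      exact ⟨c :: y, z, zs, by simp [mySplit, hc, hy, consHead]⟩

theorem mySplit_last_suffix (cs : List Char) (h : '.' ∈ cs) :
    ∃ x, (mySplit cs).getLast? = some x ∧ ('.' :: x) <:+ cs := by
  induction cs with
  | nil => simp at h
  | cons c t ih =>
    by_cases hc : c = '.'
    · subst hc
      by_cases ht : '.' ∈ t
      · obtain ⟨x, hx, hs⟩ := ih ht
        obtain ⟨y, ys, hy⟩ := mySplit_cons t
        refine ⟨x, ?_, hs.trans (List.suffix_cons _ _)⟩
        rw [show mySplit ('.' :: t) = [] :: mySplit t from by simp [mySplit], hy,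
            List.getLast?_cons_cons, ← hy, hx]
      · refine ⟨t, ?_, List.suffix_refl _⟩
        rw [show mySplit ('.' :: t) = [] :: mySplit t from by simp [mySplit],
            mySplit_no_dot t ht]
        simp
    · have ht : '.' ∈ t := by
        rcases List.mem_cons.mp h with h1 | h1
        · exact absurd h1.symm hc
        · exact h1
      obtain ⟨x, hx, hs⟩ := ih ht
      obtain ⟨y, z, zs, hy⟩ := mySplit_dot t ht
      refine ⟨x, ?_, hs.trans (List.suffix_cons _ _)⟩
      rw [show mySplit (c :: t) = consHead [c] (mySplit t) from by simp [mySplit, hc], hy]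
      simp only [consHead, List.getLast?_cons_cons]
      rw [hy] at hx
      simpa using hx

theorem find_step (M : List String)
    (hd : ∀ k ∈ M, k.toList.head? = some '.')
    (hp : M.Pairwise (fun a b => b.toList.length ≤ a.toList.length))
    (hn : (M.map String.toList).Nodup)
    (c : Char) (t : List Char) :
    M.find? (fun k => PySem.Chars.endswith (c :: t) k.toList) =
      if (c :: t) ∈ M.map String.toList then some (String.ofList (c :: t))
      else M.find? (fun k => PySem.Chars.endswith t k.toList) := by
  induction M with
  | nil => simp
  | cons k M' ih =>
    have hd' : ∀ k' ∈ M', k'.toList.head? = some '.' :=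
      fun k' hk' => hd k' (List.mem_cons_of_mem _ hk')
    obtain ⟨hpk, hp'⟩ := List.pairwise_cons.mp hp
    rw [List.map_cons, List.nodup_cons] at hn
    obtain ⟨-, hn'⟩ := hn
    by_cases hmatch : PySem.Chars.endswith (c :: t) k.toList = true
    · rw [List.find?_cons_of_pos (p := fun k => PySem.Chars.endswith (c :: t) k.toList)
            (a := k) (l := M') hmatch]
      have hsuf : k.toList <:+ c :: t := (PySem.Chars.endswith_iff _ _).mp hmatch
      rcases List.suffix_cons_iff.mp hsuf with heq | hsuf'
      · rw [if_pos (by rw [List.map_cons]; exact List.mem_cons.mpr (Or.inl heq.symm))]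
        rw [← heq, String.ofList_toList]
      · have hlen : k.toList.length ≤ t.length := hsuf'.length_le
        have hmem : (c :: t) ∉ (k :: M').map String.toList := by
          rw [List.map_cons]
          intro hmem
          rcases List.mem_cons.mp hmem with h1 | h1
          · have hlen2 : (c :: t).length = k.toList.length := congrArg List.length h1
            simp only [List.length_cons] at hlen2
            omega
          · obtain ⟨k', hk', hke⟩ := List.mem_map.mp h1
            have h2 := hpk k' hk'
            have : k'.toList.length = t.length + 1 := by rw [hke]; simp
            omega
        rw [if_neg hmem,
            List.find?_cons_of_pos (p := fun k => PySem.Chars.endswith t k.toList)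
              (a := k) (l := M')
              (show PySem.Chars.endswith t k.toList = true from
                (PySem.Chars.endswith_iff _ _).mpr hsuf')]
    · rw [List.find?_cons_of_neg (p := fun k => PySem.Chars.endswith (c :: t) k.toList)
            (a := k) (l := M') hmatch]
      have hne : ¬ (c :: t) = k.toList := fun he =>
        hmatch ((PySem.Chars.endswith_iff _ _).mpr (he ▸ List.suffix_refl _))
      have hnt : ¬ (PySem.Chars.endswith t k.toList = true) := fun hth =>
        hmatch ((PySem.Chars.endswith_iff _ _).mpr
          (((PySem.Chars.endswith_iff _ _).mp hth).trans (List.suffix_cons c t)))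
      rw [ih hd' hp' hn']
      rw [List.find?_cons_of_neg (p := fun k => PySem.Chars.endswith t k.toList)
            (a := k) (l := M') hnt, List.map_cons]
      by_cases hmem : (c :: t) ∈ M'.map String.toList
      · rw [if_pos hmem, if_pos (List.mem_cons.mpr (Or.inr hmem))]
      · rw [if_neg hmem, if_neg (by simp [List.mem_cons, hne, hmem])]

theorem find_eq_go (cs : List Char) :
    SORTED_KEYS.find? (fun k => PySem.Chars.endswith cs k.toList) = tld_go cs := by
  induction cs with
  | nil =>
    rw [show tld_go [] = none from rfl]
    apply List.find?_eq_none.mpr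
    decide
  | cons c t ih =>
    rw [find_step SORTED_KEYS sortedKeys_head sortedKeys_pairwise sortedKeys_nodup c t]
    by_cases hmem : (c :: t) ∈ SORTED_KEYS.map String.toList
    · rw [if_pos hmem]
      obtain ⟨k, hk, hke⟩ := List.mem_map.mp hmem
      have hc : c = '.' := by
        have h1 := sortedKeys_head k hk
        rw [hke] at h1
        simpa using h1
      subst hc
      have hmem2 : String.ofList ('.' :: t) ∈ TLD_KEYS := by
        have h2 : String.ofList ('.' :: t) = k := by rw [← hke, String.ofList_toList]
        rw [h2]
        exact sortedKeys_sub k hk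
      simp [tld_go, hmem2]
    · rw [if_neg hmem, ih]
      have hnotin : String.ofList (c :: t) ∉ TLD_KEYS := fun hmemk =>
        hmem (List.mem_map.mpr ⟨String.ofList (c :: t),
          keys_sub_sorted _ hmemk, String.toList_ofList⟩)
      simp [tld_go, hnotin]

theorem core_eq_go (s : List Char) : extract_tld_core s = tld_go s := by
  unfold extract_tld_core
  rw [sortedKeys_eq]
  cases hfind : SORTED_KEYS.find? (fun k => PySem.Chars.endswith s k.toList) with
  | some tld => rw [← find_eq_go s, hfind]
  | none =>
    rw [← find_eq_go s, hfind]
    by_cases hin : PySem.Chars.isIn ['.'] s = true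
    · have hdot : '.' ∈ s := singleton_infix.mp ((PySem.Chars.isIn_iff_infix _ _).mp hin)
      obtain ⟨x, hx, hsuf⟩ := mySplit_last_suffix s hdot
      have hnot : String.ofList ('.' :: x) ∉ TLD_KEYS := by
        intro hmem
        have hmem' := keys_sub_sorted _ hmem
        apply List.find?_eq_none.mp hfind _ hmem'
        rw [PySem.Chars.endswith_iff, String.toList_ofList]
        exact hsuf
      simp [hin, splitOn_dot, pyGet?_neg_one, hx, hnot]
    · simp [hin]

-- ===== VERDICT (by name: the statement is the Claim_ definition above) =====
theorem extract_tld_spec : Claim_equal_extract_tld := by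
  intro fqdn _
  unfold Spec_extract_tld extract_tld extract_tld_alt
  by_cases h0 : fqdn.toList = []
  · simp [h0]
  · rw [if_neg h0, if_neg h0, core_eq_go]
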